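-- pv_equiv track=rewrite | github.com/michaelychen001/Leetcode-practice | 10_02_2023/Split_String_[Medium].py | split_sting_ways
-- ===== SOURCE A (Python) =====
-- def split_sting_ways(s):
--     cnt = 0
--     for i in range(1, len(s)):
--         s1_unique = set(s[:i])
--         s2_unique = set(s[i:])
--         if s1_unique == s2_unique:
--             cnt += 1
--     return cnt
-- ===== SOURCE B (Python) =====
-- def split_sting_ways(s):
--     # One right-to-left pass precomputes every suffix char-set; one left-to-right
--     # pass grows the prefix char-set incrementally and compares.
--     cur = set()
--     sufs = []
--     for c in reversed(s):
--         cur = cur | {c}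
--         sufs.append(cur)
--     sufs.reverse()          # sufs[i] == set(s[i:])
--     cnt = 0
--     prefix = set()
--     for c, suf in zip(s, sufs[1:]):
--         prefix.add(c)
--         if prefix == suf:
--             cnt += 1
--     return cnt
-- ===== Notes on version B (the rewrite author's own statement) =====
-- stated objective: faster
-- what changed: A rebuilds set(s[:i]) and set(s[i:]) from scratch at every split point; B precomputes all suffix char-sets in one right-to-left pass and grows the prefix char-set incrementally in a second pass.
import Mathlib
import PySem

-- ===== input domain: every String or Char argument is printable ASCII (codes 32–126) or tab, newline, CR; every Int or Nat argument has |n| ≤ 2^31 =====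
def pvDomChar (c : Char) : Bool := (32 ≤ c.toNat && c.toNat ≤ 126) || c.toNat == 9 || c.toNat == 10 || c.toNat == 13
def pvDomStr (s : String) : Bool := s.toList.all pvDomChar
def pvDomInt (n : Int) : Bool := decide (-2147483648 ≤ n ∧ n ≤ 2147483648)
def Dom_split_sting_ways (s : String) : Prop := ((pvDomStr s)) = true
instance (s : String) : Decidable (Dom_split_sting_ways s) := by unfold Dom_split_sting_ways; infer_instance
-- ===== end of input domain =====

-- B replaces A's quadratic rebuild of both char-sets at every split point by one
-- right-to-left pass precomputing all suffix sets plus an incrementally grown prefix set.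

-- ===== PORT A =====
def split_sting_ways (s : String) : Int :=
  (PySem.List.pyRange 1 (PySem.Str.len s) 1).foldl
    (fun cnt i =>
      let s1_unique := PySem.Set.ofList (PySem.List.slice s.toList none (some i))
      let s2_unique := PySem.Set.ofList (PySem.List.slice s.toList (some i) none)
      if PySem.Set.equal s1_unique s2_unique then cnt + 1 else cnt) 0

-- ===== PORT B =====
-- loop 1 of Source B: for c in reversed(s): cur = cur | {c}; sufs.append(cur)
def pvBuildStep (p : PySem.Set Char × List (PySem.Set Char)) (c : Char) :
    PySem.Set Char × List (PySem.Set Char) :=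
  let cur := PySem.Set.union p.1 [c]
  (cur, p.2 ++ [cur])

def split_sting_ways_alt (s : String) : Int :=
  let sufs := (s.toList.reverse.foldl pvBuildStep (PySem.Set.empty, [])).2.reverse
  ((s.toList.zip (PySem.List.slice sufs (some 1) none)).foldl
    (fun (p : PySem.Set Char × Int) cs =>
      let pref := PySem.Set.add p.1 cs.1
      (pref, if PySem.Set.equal pref cs.2 then p.2 + 1 else p.2))
    (PySem.Set.empty, 0)).2

-- ===== PRECONDITION & SPEC =====
def Spec_split_sting_ways (s : String) (out : Int) : Prop := out = split_sting_ways_alt s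
instance (s : String) (out : Int) : Decidable (Spec_split_sting_ways s out) := by unfold Spec_split_sting_ways; infer_instance

-- ===== CLAIM (what is proved, stated in full; the proofs are below) =====
def Claim_equal_split_sting_ways : Prop := ∀ (s : String), Dom_split_sting_ways s → Spec_split_sting_ways s (split_sting_ways s)

-- ===== LEMMAS AND PROOFS =====

-- loop 1 of Source B characterised: state after the fold = (all chars so far, cumulative suffix-set list)
theorem pvBuild_spec (r : List Char) (s0 : PySem.Set Char) (out0 : List (PySem.Set Char)) :
    r.foldl pvBuildStep (s0, out0) =
      (PySem.Set.update s0 r,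
       out0 ++ (List.range r.length).map (fun j => PySem.Set.update s0 (r.take (j+1)))) := by
  induction r generalizing s0 out0 with
  | nil => simp [PySem.Set.update]
  | cons c r ih =>
      rw [List.foldl_cons]
      have hstep : pvBuildStep (s0, out0) c = (PySem.Set.add s0 c, out0 ++ [PySem.Set.add s0 c]) := by
        simp [pvBuildStep, PySem.Set.union, PySem.Set.update]
      rw [hstep, ih]
      refine Prod.ext ?_ ?_
      · simp [PySem.Set.update_cons]
      · simp [List.range_succ_eq_map, List.map_map, Function.comp, PySem.Set.update_cons,
          List.append_assoc]

-- loop 2 of Source B characterised: the counter = countP of the per-position comparison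
theorem pvFold2_eq (ps : List (Char × PySem.Set Char)) (s0 : PySem.Set Char) (c0 : Int) :
    (ps.foldl
      (fun (p : PySem.Set Char × Int) cs =>
        let pref := PySem.Set.add p.1 cs.1
        (pref, if PySem.Set.equal pref cs.2 then p.2 + 1 else p.2)) (s0, c0)).2 =
      c0 + ((List.range ps.length).countP
        (fun k => PySem.Set.equal (PySem.Set.update s0 ((ps.map Prod.fst).take (k+1)))
          ((ps.map Prod.snd).getD k PySem.Set.empty)) : Nat) := by
  induction ps generalizing s0 c0 with
  | nil => simp
  | cons p ps ih =>
      rw [List.foldl_cons]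
      dsimp only
      rw [ih]
      rw [List.length_cons, List.range_succ_eq_map, List.countP_cons, List.countP_map]
      simp only [List.map_cons, List.take_succ_cons, PySem.Set.update_cons,
        Function.comp_def, Nat.succ_eq_add_one, List.getD_cons_succ, List.getD_cons_zero,
        List.take_zero, PySem.Set.update_nil]
      split_ifs <;> push_cast <;> ring

-- A's loop = countP over the split positions
theorem pvA_eq (s : String) :
    split_sting_ways s =
      ((List.range (s.toList.length - 1)).countP
        (fun k => PySem.Set.equal (PySem.Set.ofList (s.toList.take (k+1)))
          (PySem.Set.ofList (s.toList.drop (k+1)))) : Nat) := by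
  unfold split_sting_ways
  rw [PySem.List.pyRange_one, List.foldl_map]
  dsimp only
  rw [PySem.List.foldl_count_if (fun k : Nat =>
    PySem.Set.equal (PySem.Set.ofList (PySem.List.slice s.toList none (some (1 + (k : Int)))))
      (PySem.Set.ofList (PySem.List.slice s.toList (some (1 + (k : Int))) none)))]
  have hn : (PySem.Str.len s - 1).toNat = s.toList.length - 1 := by
    simp [PySem.Str.len_eq]
  rw [hn]
  rw [zero_add]
  congr 1
  apply List.countP_congr
  intro k _
  have h1 : (1 : Int) + (k : Nat) = ((k + 1 : Nat) : Int) := by push_cast; ring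
  simp only [h1, PySem.List.slice_to_natCast, PySem.List.slice_from_natCast]

-- zip keeps the left list's first t.length elements
theorem pvMapFstZip {α β : Type} (l : List α) (t : List β) (h : t.length ≤ l.length) :
    (l.zip t).map Prod.fst = l.take t.length := by
  induction t generalizing l with
  | nil => simp
  | cons b t ih =>
      cases l with
      | nil => simp at h
      | cons a l => simp_all

-- comparing the incrementally built sets equals comparing set(prefix) with set(suffix)
theorem pvEqb (l : List Char) (k : Nat) (hk : k + 1 ≤ l.length) :
    PySem.Set.equal (PySem.Set.update PySem.Set.empty (l.take (k+1)))
        (PySem.Set.update PySem.Set.empty (l.reverse.take (l.length - (k+1))))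
      = PySem.Set.equal (PySem.Set.ofList (l.take (k+1))) (PySem.Set.ofList (l.drop (k+1))) := by
  have h2 : l.length - (l.length - (k+1)) = k+1 := by omega
  rw [List.take_reverse, h2]
  rw [Bool.eq_iff_iff, PySem.Set.equal_iff, PySem.Set.equal_iff]
  constructor <;> intro h x <;>
    simpa [PySem.Set.mem_update, PySem.Set.mem_ofList, List.mem_reverse, PySem.Set.empty]
      using h x

-- B's program = the same countP
theorem pvB_eq (s : String) :
    split_sting_ways_alt s =
      ((List.range (s.toList.length - 1)).countP
        (fun k => PySem.Set.equal (PySem.Set.ofList (s.toList.take (k+1)))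
          (PySem.Set.ofList (s.toList.drop (k+1)))) : Nat) := by
  unfold split_sting_ways_alt
  simp only [PySem.List.slice_from_one, pvBuild_spec, List.nil_append, List.length_reverse]
  rw [pvFold2_eq, zero_add]
  set l := s.toList with hl
  set n := l.length with hn
  set f : Nat → PySem.Set Char :=
    fun j => PySem.Set.update PySem.Set.empty (l.reverse.take (j+1)) with hf
  set sufs : List (PySem.Set Char) := ((List.range n).map f).reverse with hs
  have hsl : sufs.length = n := by simp [hs]
  have htl : sufs.tail.length = n - 1 := by simp [List.length_tail, hsl]
  have hpl : (l.zip sufs.tail).length = n - 1 := by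
    rw [List.length_zip, htl]; omega
  rw [hpl]
  norm_cast
  apply List.countP_congr
  intro k hk
  rw [List.mem_range] at hk
  have hfst : ((l.zip sufs.tail).map Prod.fst).take (k+1) = l.take (k+1) := by
    rw [pvMapFstZip _ _ (by rw [htl]; omega), htl, List.take_take]
    congr 1
    omega
  have hklt : k < (l.zip sufs.tail).length := by rw [hpl]; omega
  have hsnd : ((l.zip sufs.tail).map Prod.snd).getD k PySem.Set.empty
      = PySem.Set.update PySem.Set.empty (l.reverse.take (n - (k+1))) := by
    rw [List.getD_eq_getElem _ _ (by simpa using hklt)]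
    rw [List.getElem_map, List.getElem_zip]
    dsimp only
    rw [List.getElem_tail]
    simp only [hs, List.getElem_reverse, List.getElem_map, List.getElem_range,
      List.length_map, List.length_range, hf]
    have h3 : n - 1 - (k + 1) + 1 = n - (k + 1) := by omega
    rw [h3]
  rw [hfst, hsnd, hn]
  rw [pvEqb l k (by omega)]

-- ===== VERDICT (by name: the statement is the Claim_ definition above) =====
theorem split_sting_ways_spec : Claim_equal_split_sting_ways := by
  intro s _
  show split_sting_ways s = split_sting_ways_alt s
  rw [pvA_eq, pvB_eq]
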